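-- pv_equiv track=rewrite | github.com/bmbell23/stephen-king-parser | old/parse_king_works-V2.0.3.py | process_formats
-- ===== SOURCE A (Python) =====
-- from typing import Dict, List, Optional, Tuple
--
-- def process_formats(formats_str: str) -> Dict[str, str]:
--     """
--     Process formats string into a dictionary of format availability.
--
--     Args:
--         formats_str (str): Comma-separated string of formats
--
--     Returns:
--         Dict[str, str]: Dictionary with format types as keys and '✓' or '' as values
--     """
--     formats_dict = {
--         "Hardcover": "",
--         "Paperback": "",
--         "Ebook": "",
--         "Audiobook": "",
--         "Movie": "",
--         "Miniseries": "",
--     }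
--
--     if not formats_str:
--         return formats_dict
--
--     format_list = [fmt.strip() for fmt in formats_str.split(",")]
--     for fmt in format_list:
--         fmt = fmt.strip()
--         if "Hardcover" in fmt:
--             formats_dict["Hardcover"] = "✓"
--         if "Paperback" in fmt:
--             formats_dict["Paperback"] = "✓"
--         if "Kindle" in fmt or "eBook" in fmt:
--             formats_dict["Ebook"] = "✓"
--         if "Audio" in fmt or "Audiobook" in fmt:
--             formats_dict["Audiobook"] = "✓"
--         if "Movie" in fmt:
--             formats_dict["Movie"] = "✓"
--         if "TV" in fmt or "Miniseries" in fmt: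
--             formats_dict["Miniseries"] = "✓"
--
--     return formats_dict
-- ===== SOURCE B (Python) =====
-- def process_formats(formats_str: str) -> dict:
--     """Table-driven: one substring test per trigger against the whole
--     (unsplit) string; triggers contain no comma and no whitespace, so
--     presence in the whole string equals presence in some stripped part."""
--     triggers = {
--         "Hardcover": ["Hardcover"],
--         "Paperback": ["Paperback"],
--         "Ebook": ["Kindle", "eBook"],
--         "Audiobook": ["Audio", "Audiobook"],
--         "Movie": ["Movie"],
--         "Miniseries": ["TV", "Miniseries"],
--     }
--     return {
--         key: ("✓" if any(t in formats_str for t in subs) else "")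
--         for key, subs in triggers.items()
--     }
-- ===== Notes on version B (the rewrite author's own statement) =====
-- stated objective: simpler
-- what changed: Replaces split-on-comma + strip + per-part loop mutating a dict with a single table-driven dict comprehension that tests each trigger substring against the whole unsplit string (safe since no trigger contains a comma or whitespace).
import Mathlib
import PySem

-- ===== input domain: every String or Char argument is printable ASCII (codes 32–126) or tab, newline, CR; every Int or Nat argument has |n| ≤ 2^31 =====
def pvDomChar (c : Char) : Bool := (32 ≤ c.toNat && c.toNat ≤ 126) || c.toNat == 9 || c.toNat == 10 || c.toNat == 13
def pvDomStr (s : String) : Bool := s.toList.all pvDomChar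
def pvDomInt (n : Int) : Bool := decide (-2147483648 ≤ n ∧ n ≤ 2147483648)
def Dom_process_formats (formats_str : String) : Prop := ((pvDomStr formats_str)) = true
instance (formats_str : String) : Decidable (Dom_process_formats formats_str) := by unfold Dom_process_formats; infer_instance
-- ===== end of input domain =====

-- B replaces A's split-on-comma + strip + per-part dict-mutating loop by a table-driven
-- construction testing each trigger against the whole unsplit string (objective: simpler).

-- ===== PORT A =====
-- the body of A's for-loop (one dict update step per stripped part)
def pvStepA (fd0 : PySem.Dict String String) (fmt0 : List Char) : PySem.Dict String String :=
  let fmt := PySem.Chars.strip fmt0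
  let fd1 := if PySem.Chars.isIn "Hardcover".toList fmt then fd0.insert "Hardcover" "✓" else fd0
  let fd2 := if PySem.Chars.isIn "Paperback".toList fmt then fd1.insert "Paperback" "✓" else fd1
  let fd3 := if PySem.Chars.isIn "Kindle".toList fmt || PySem.Chars.isIn "eBook".toList fmt then fd2.insert "Ebook" "✓" else fd2
  let fd4 := if PySem.Chars.isIn "Audio".toList fmt || PySem.Chars.isIn "Audiobook".toList fmt then fd3.insert "Audiobook" "✓" else fd3
  let fd5 := if PySem.Chars.isIn "Movie".toList fmt then fd4.insert "Movie" "✓" else fd4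
  if PySem.Chars.isIn "TV".toList fmt || PySem.Chars.isIn "Miniseries".toList fmt then fd5.insert "Miniseries" "✓" else fd5

def process_formats (formats_str : String) : List (String × String) :=
  let formats_dict : PySem.Dict String String := PySem.Dict.ofList
    [("Hardcover", ""), ("Paperback", ""), ("Ebook", ""), ("Audiobook", ""), ("Movie", ""), ("Miniseries", "")]
  if formats_str.toList = [] then formats_dict.items
  else
    let format_list := (PySem.Chars.splitOn formats_str.toList [',']).map PySem.Chars.strip
    (format_list.foldl pvStepA formats_dict).items

-- ===== PORT B =====
def process_formats_alt (formats_str : String) : List (String × String) :=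
  let triggers : List (String × List String) :=
    [("Hardcover", ["Hardcover"]), ("Paperback", ["Paperback"]), ("Ebook", ["Kindle", "eBook"]),
     ("Audiobook", ["Audio", "Audiobook"]), ("Movie", ["Movie"]), ("Miniseries", ["TV", "Miniseries"])]
  triggers.map (fun kv =>
    (kv.1, if kv.2.any (fun t => PySem.Chars.isIn t.toList formats_str.toList) then "✓" else ""))

-- ===== PRECONDITION & SPEC =====
def Spec_process_formats (formats_str : String) (out : List (String × String)) : Prop := out = process_formats_alt formats_str
instance (formats_str : String) (out : List (String × String)) : Decidable (Spec_process_formats formats_str out) := by unfold Spec_process_formats; infer_instance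

-- ===== CLAIM (what is proved, stated in full; the proofs are below) =====
def Claim_equal_process_formats : Prop := ∀ (formats_str : String), Dom_process_formats formats_str → Spec_process_formats formats_str (process_formats formats_str)

-- ===== LEMMAS AND PROOFS =====

def pvMark (b : Bool) : String := if b then "✓" else ""

def pvItems (b1 b2 b3 b4 b5 b6 : Bool) : List (String × String) :=
  [("Hardcover", pvMark b1), ("Paperback", pvMark b2), ("Ebook", pvMark b3),
   ("Audiobook", pvMark b4), ("Movie", pvMark b5), ("Miniseries", pvMark b6)]

def pvD (b1 b2 b3 b4 b5 b6 : Bool) : PySem.Dict String String :=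
  PySem.Dict.mk (pvItems b1 b2 b3 b4 b5 b6)

-- inserting "✓" at each of the six (present) keys of pvD
lemma pv_ins1 (b1 b2 b3 b4 b5 b6 : Bool) :
    (pvD b1 b2 b3 b4 b5 b6).insert "Hardcover" "✓" = pvD true b2 b3 b4 b5 b6 := by
  simp [pvD, pvItems, PySem.Dict.insert, PySem.Dict.contains, pvMark]

lemma pv_ins2 (b1 b2 b3 b4 b5 b6 : Bool) :
    (pvD b1 b2 b3 b4 b5 b6).insert "Paperback" "✓" = pvD b1 true b3 b4 b5 b6 := by
  simp [pvD, pvItems, PySem.Dict.insert, PySem.Dict.contains, pvMark]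

lemma pv_ins3 (b1 b2 b3 b4 b5 b6 : Bool) :
    (pvD b1 b2 b3 b4 b5 b6).insert "Ebook" "✓" = pvD b1 b2 true b4 b5 b6 := by
  simp [pvD, pvItems, PySem.Dict.insert, PySem.Dict.contains, pvMark]

lemma pv_ins4 (b1 b2 b3 b4 b5 b6 : Bool) :
    (pvD b1 b2 b3 b4 b5 b6).insert "Audiobook" "✓" = pvD b1 b2 b3 true b5 b6 := by
  simp [pvD, pvItems, PySem.Dict.insert, PySem.Dict.contains, pvMark]

lemma pv_ins5 (b1 b2 b3 b4 b5 b6 : Bool) :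
    (pvD b1 b2 b3 b4 b5 b6).insert "Movie" "✓" = pvD b1 b2 b3 b4 true b6 := by
  simp [pvD, pvItems, PySem.Dict.insert, PySem.Dict.contains, pvMark]

lemma pv_ins6 (b1 b2 b3 b4 b5 b6 : Bool) :
    (pvD b1 b2 b3 b4 b5 b6).insert "Miniseries" "✓" = pvD b1 b2 b3 b4 b5 true := by
  simp [pvD, pvItems, PySem.Dict.insert, PySem.Dict.contains, pvMark]

lemma pv_ci1 (c b1 b2 b3 b4 b5 b6 : Bool) :
    (if c = true then (pvD b1 b2 b3 b4 b5 b6).insert "Hardcover" "✓" else pvD b1 b2 b3 b4 b5 b6)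
      = pvD (b1 || c) b2 b3 b4 b5 b6 := by
  cases c
  · simp
  · simpa using pv_ins1 b1 b2 b3 b4 b5 b6

lemma pv_ci2 (c b1 b2 b3 b4 b5 b6 : Bool) :
    (if c = true then (pvD b1 b2 b3 b4 b5 b6).insert "Paperback" "✓" else pvD b1 b2 b3 b4 b5 b6)
      = pvD b1 (b2 || c) b3 b4 b5 b6 := by
  cases c
  · simp
  · simpa using pv_ins2 b1 b2 b3 b4 b5 b6

lemma pv_ci3 (c b1 b2 b3 b4 b5 b6 : Bool) :
    (if c = true then (pvD b1 b2 b3 b4 b5 b6).insert "Ebook" "✓" else pvD b1 b2 b3 b4 b5 b6)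
      = pvD b1 b2 (b3 || c) b4 b5 b6 := by
  cases c
  · simp
  · simpa using pv_ins3 b1 b2 b3 b4 b5 b6

lemma pv_ci4 (c b1 b2 b3 b4 b5 b6 : Bool) :
    (if c = true then (pvD b1 b2 b3 b4 b5 b6).insert "Audiobook" "✓" else pvD b1 b2 b3 b4 b5 b6)
      = pvD b1 b2 b3 (b4 || c) b5 b6 := by
  cases c
  · simp
  · simpa using pv_ins4 b1 b2 b3 b4 b5 b6

lemma pv_ci5 (c b1 b2 b3 b4 b5 b6 : Bool) :
    (if c = true then (pvD b1 b2 b3 b4 b5 b6).insert "Movie" "✓" else pvD b1 b2 b3 b4 b5 b6)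
      = pvD b1 b2 b3 b4 (b5 || c) b6 := by
  cases c
  · simp
  · simpa using pv_ins5 b1 b2 b3 b4 b5 b6

lemma pv_ci6 (c b1 b2 b3 b4 b5 b6 : Bool) :
    (if c = true then (pvD b1 b2 b3 b4 b5 b6).insert "Miniseries" "✓" else pvD b1 b2 b3 b4 b5 b6)
      = pvD b1 b2 b3 b4 b5 (b6 || c) := by
  cases c
  · simp
  · simpa using pv_ins6 b1 b2 b3 b4 b5 b6

lemma pv_step_eq (b1 b2 b3 b4 b5 b6 : Bool) (p : List Char) :
    pvStepA (pvD b1 b2 b3 b4 b5 b6) p =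
    pvD (b1 || PySem.Chars.isIn "Hardcover".toList (PySem.Chars.strip p))
        (b2 || PySem.Chars.isIn "Paperback".toList (PySem.Chars.strip p))
        (b3 || (PySem.Chars.isIn "Kindle".toList (PySem.Chars.strip p) || PySem.Chars.isIn "eBook".toList (PySem.Chars.strip p)))
        (b4 || (PySem.Chars.isIn "Audio".toList (PySem.Chars.strip p) || PySem.Chars.isIn "Audiobook".toList (PySem.Chars.strip p)))
        (b5 || PySem.Chars.isIn "Movie".toList (PySem.Chars.strip p))
        (b6 || (PySem.Chars.isIn "TV".toList (PySem.Chars.strip p) || PySem.Chars.isIn "Miniseries".toList (PySem.Chars.strip p))) := by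
  simp only [pvStepA, pv_ci1, pv_ci2, pv_ci3, pv_ci4, pv_ci5, pv_ci6]

lemma pv_fold (l : List (List Char)) : ∀ b1 b2 b3 b4 b5 b6 : Bool,
    l.foldl pvStepA (pvD b1 b2 b3 b4 b5 b6) =
    pvD (b1 || l.any (fun p => PySem.Chars.isIn "Hardcover".toList (PySem.Chars.strip p)))
        (b2 || l.any (fun p => PySem.Chars.isIn "Paperback".toList (PySem.Chars.strip p)))
        (b3 || l.any (fun p => PySem.Chars.isIn "Kindle".toList (PySem.Chars.strip p) || PySem.Chars.isIn "eBook".toList (PySem.Chars.strip p)))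
        (b4 || l.any (fun p => PySem.Chars.isIn "Audio".toList (PySem.Chars.strip p) || PySem.Chars.isIn "Audiobook".toList (PySem.Chars.strip p)))
        (b5 || l.any (fun p => PySem.Chars.isIn "Movie".toList (PySem.Chars.strip p)))
        (b6 || l.any (fun p => PySem.Chars.isIn "TV".toList (PySem.Chars.strip p) || PySem.Chars.isIn "Miniseries".toList (PySem.Chars.strip p))) := by
  induction l with
  | nil => intro b1 b2 b3 b4 b5 b6; simp
  | cons p l ih =>
      intro b1 b2 b3 b4 b5 b6
      simp only [List.foldl_cons, pv_step_eq, ih, List.any_cons, Bool.or_assoc]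

-- PySem's fueled comma-split is List.splitOnP on (· == ',')
lemma pv_go (c : Char) : ∀ (fuel : Nat) (l cur : List Char) (acc : List (List Char)),
    l.length ≤ fuel →
    PySem.Chars.splitOn.go [c] fuel l cur acc
      = acc.reverse ++ List.modifyHead (fun x => cur.reverse ++ x) (l.splitOnP (fun a => a == c)) := by
  intro fuel
  induction fuel with
  | zero =>
      intro l cur acc h
      have hl : l = [] := List.eq_nil_of_length_eq_zero (Nat.le_zero.mp h)
      subst hl
      simp [PySem.Chars.splitOn.go, List.splitOnP_nil]
  | succ fuel ih =>
      intro l cur acc h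
      cases l with
      | nil => simp [PySem.Chars.splitOn.go, List.splitOnP_nil]
      | cons x rest =>
          by_cases hx : (x == c) = true
          · have hpre : [c].isPrefixOf (x :: rest) = true := by
              simp [List.isPrefixOf]
              exact (beq_iff_eq.mp hx).symm ▸ rfl
            rw [PySem.Chars.splitOn.go]
            rw [if_pos hpre]
            have hrest : rest.length ≤ fuel := by simpa using Nat.le_of_succ_le_succ h
            have := ih (List.drop [c].length (x :: rest)) [] (cur.reverse :: acc) (by simpa using hrest)
            rw [this]
            rw [List.splitOnP_cons, if_pos hx]
            obtain ⟨a, as, hsp⟩ := List.exists_cons_of_ne_nil (List.splitOnP_ne_nil (fun a => a == c) rest)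
            simp [hsp, List.modifyHead_cons]
          · have hpre : [c].isPrefixOf (x :: rest) = false := by
              simp [List.isPrefixOf]
              intro hcx
              exact absurd (by simpa [hcx] : (x == c) = true) hx
            rw [PySem.Chars.splitOn.go]
            rw [if_neg (by simp [hpre])]
            have hrest : rest.length ≤ fuel := by simpa using Nat.le_of_succ_le_succ h
            rw [ih rest (x :: cur) acc hrest]
            rw [List.splitOnP_cons, if_neg (by simp [hx])]
            obtain ⟨a, as, hsp⟩ := List.exists_cons_of_ne_nil (List.splitOnP_ne_nil (fun a => a == c) rest)
            simp [hsp, List.modifyHead_cons]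

lemma pv_splitOn (s : List Char) (c : Char) :
    PySem.Chars.splitOn s [c] = s.splitOnP (fun a => a == c) := by
  unfold PySem.Chars.splitOn
  rw [pv_go c (s.length + 1) s [] [] (by omega)]
  obtain ⟨a, as, hsp⟩ := List.exists_cons_of_ne_nil (List.splitOnP_ne_nil (fun a => a == c) s)
  simp [hsp, List.modifyHead_cons]

lemma pv_head_tail {α : Type} (q : α → Bool) : ∀ s : List α,
    ∃ tl, s.splitOnP q = (s.takeWhile (fun a => !(q a))) :: tl ∧ ∀ p ∈ tl, p <:+: s := by
  intro s
  induction s with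
  | nil => exact ⟨[], by simp [List.splitOnP_nil], by simp⟩
  | cons x xs ih =>
      obtain ⟨tl, heq, hmem⟩ := ih
      by_cases hx : q x = true
      · refine ⟨xs.splitOnP q, ?_, ?_⟩
        · rw [List.splitOnP_cons, if_pos hx]
          simp [hx]
        · intro p hp
          have : p <:+: xs := by
            rw [heq] at hp
            rcases List.mem_cons.mp hp with h | h
            · exact h ▸ (List.takeWhile_prefix _).isInfix
            · exact hmem p h
          exact List.infix_cons_iff.mpr (Or.inr this)
      · refine ⟨tl, ?_, ?_⟩
        · rw [List.splitOnP_cons, if_neg hx, heq, List.modifyHead_cons]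
          simp [hx]
        · intro p hp
          exact List.infix_cons_iff.mpr (Or.inr (hmem p hp))

lemma pv_mem_infix {α : Type} {q : α → Bool} {s p : List α}
    (hp : p ∈ s.splitOnP q) : p <:+: s := by
  obtain ⟨tl, heq, hmem⟩ := pv_head_tail q s
  rw [heq] at hp
  rcases List.mem_cons.mp hp with h | h
  · exact h ▸ (List.takeWhile_prefix _).isInfix
  · exact hmem p h

lemma pv_prefix_takeWhile {α : Type} (r : α → Bool) : ∀ (t m : List α),
    t <+: m → (∀ a ∈ t, r a = true) → t <+: m.takeWhile r := by
  intro t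
  induction t with
  | nil => intro m _ _; exact List.nil_prefix
  | cons x t' ih =>
      intro m hpre hall
      cases m with
      | nil => exact absurd (List.prefix_nil.mp hpre) (by simp)
      | cons y m' =>
          obtain ⟨hxy, hpre'⟩ := List.cons_prefix_cons.mp hpre
          have hrx : r x = true := hall x (List.mem_cons_self)
          subst hxy
          rw [List.takeWhile_cons, if_pos hrx]
          exact List.cons_prefix_cons.mpr ⟨rfl, ih m' hpre' (fun a ha => hall a (List.mem_cons_of_mem _ ha))⟩

lemma pv_exists_part {α : Type} (q : α → Bool) : ∀ (s t : List α),
    t ≠ [] → (∀ a ∈ t, q a = false) → t <:+: s → ∃ p ∈ s.splitOnP q, t <:+: p := by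
  intro s
  induction s with
  | nil =>
      intro t ht _ hinf
      exact absurd (List.infix_nil.mp hinf) ht
  | cons x xs ih =>
      intro t ht hq hinf
      rcases List.infix_cons_iff.mp hinf with hpre | hinf'
      · cases t with
        | nil => exact absurd rfl ht
        | cons a t' =>
            obtain ⟨hax, hpre'⟩ := List.cons_prefix_cons.mp hpre
            subst hax
            have hqx : q a = false := hq a (List.mem_cons_self)
            obtain ⟨tl, heq, _⟩ := pv_head_tail q xs
            refine ⟨a :: xs.takeWhile (fun b => !(q b)), ?_, ?_⟩
            · rw [List.splitOnP_cons, if_neg (by simp [hqx]), heq, List.modifyHead_cons]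
              exact List.mem_cons_self
            · have : t' <+: xs.takeWhile (fun b => !(q b)) :=
                pv_prefix_takeWhile _ t' xs hpre'
                  (fun b hb => by simp [hq b (List.mem_cons_of_mem _ hb)])
              exact (List.cons_prefix_cons.mpr ⟨rfl, this⟩).isInfix
      · obtain ⟨p, hp, hip⟩ := ih t ht hq hinf'
        by_cases hqx : q x = true
        · exact ⟨p, by rw [List.splitOnP_cons, if_pos hqx]; exact List.mem_cons_of_mem _ hp, hip⟩
        · obtain ⟨a, as, hsp⟩ := List.exists_cons_of_ne_nil (List.splitOnP_ne_nil q xs)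
          rw [hsp] at hp
          rcases List.mem_cons.mp hp with h | h
          · refine ⟨x :: a, ?_, ?_⟩
            · rw [List.splitOnP_cons, if_neg hqx, hsp, List.modifyHead_cons]
              exact List.mem_cons_self
            · exact List.infix_cons_iff.mpr (Or.inr (h ▸ hip))
          · refine ⟨p, ?_, hip⟩
            rw [List.splitOnP_cons, if_neg hqx, hsp, List.modifyHead_cons]
            exact List.mem_cons_of_mem _ h

lemma pv_infix_dropWhile {α : Type} (r : α → Bool) : ∀ (l t : List α),
    t ≠ [] → (∀ a ∈ t, r a = false) → t <:+: l → t <:+: l.dropWhile r := by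
  intro l
  induction l with
  | nil => intro t _ _ h; simpa using h
  | cons x xs ih =>
      intro t ht hr h
      by_cases hx : r x = true
      · rw [List.dropWhile_cons, if_pos hx]
        rcases List.infix_cons_iff.mp h with hpre | hinf
        · cases t with
          | nil => exact absurd rfl ht
          | cons a t' =>
              obtain ⟨hax, _⟩ := List.cons_prefix_cons.mp hpre
              exact absurd (hax ▸ hx) (by simp [hr a (List.mem_cons_self)])
        · exact ih t ht hr hinf
      · rw [List.dropWhile_cons, if_neg hx]
        exact h

lemma pv_infix_strip {t l : List Char} (ht : t ≠ [])
    (hsp : ∀ a ∈ t, PySem.Chars.isspace a = false) (h : t <:+: l) :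
    t <:+: PySem.Chars.strip l := by
  unfold PySem.Chars.strip PySem.Chars.rstrip PySem.Chars.lstrip
  have h1 : t <:+: l.dropWhile PySem.Chars.isspace :=
    pv_infix_dropWhile _ l t ht hsp h
  have h2 : t.reverse <:+: (l.dropWhile PySem.Chars.isspace).reverse :=
    List.reverse_infix.mpr h1
  have h3 : t.reverse <:+: ((l.dropWhile PySem.Chars.isspace).reverse).dropWhile PySem.Chars.isspace :=
    pv_infix_dropWhile _ _ t.reverse (by simp [ht])
      (fun a ha => hsp a (List.mem_reverse.mp ha)) h2
  have h4 := List.reverse_infix.mpr h3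
  simpa using h4

lemma pv_strip_infix (l : List Char) : PySem.Chars.strip l <:+: l := by
  unfold PySem.Chars.strip PySem.Chars.rstrip PySem.Chars.lstrip
  have h1 : l.dropWhile PySem.Chars.isspace <:+ l := List.dropWhile_suffix _
  have h2 : ((l.dropWhile PySem.Chars.isspace).reverse.dropWhile PySem.Chars.isspace).reverse
      <+: l.dropWhile PySem.Chars.isspace := by
    have := List.dropWhile_suffix (l := (l.dropWhile PySem.Chars.isspace).reverse) PySem.Chars.isspace
    have h := List.reverse_prefix.mpr this
    simpa using h
  exact h2.isInfix.trans h1.isInfix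

lemma pv_trigger (t s : List Char) (ht : t ≠ [])
    (hc : t.all (fun a => !(a == ',')) = true)
    (hsp : t.all (fun a => !(PySem.Chars.isspace a)) = true) :
    (∃ p ∈ (PySem.Chars.splitOn s [',']).map PySem.Chars.strip,
        PySem.Chars.isIn t (PySem.Chars.strip p) = true)
      ↔ PySem.Chars.isIn t s = true := by
  have hc' : ∀ a ∈ t, (a == ',') = false := by simpa using List.all_eq_true.mp hc
  have hsp' : ∀ a ∈ t, PySem.Chars.isspace a = false := by simpa using List.all_eq_true.mp hsp
  rw [pv_splitOn]
  simp only [List.mem_map, PySem.Chars.isIn_iff_infix]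
  constructor
  · rintro ⟨p', ⟨p, hp, rfl⟩, hin⟩
    exact hin.trans ((pv_strip_infix _).trans ((pv_strip_infix p).trans (pv_mem_infix hp)))
  · intro h
    obtain ⟨p, hp, hip⟩ := pv_exists_part (fun a => a == ',') s t ht hc' h
    exact ⟨PySem.Chars.strip p, ⟨p, hp, rfl⟩,
      pv_infix_strip ht hsp' (pv_infix_strip ht hsp' hip)⟩

lemma pv_bool_eq {a b : Bool} (h : a = true ↔ b = true) : a = b := by
  cases a <;> cases b <;> simp_all

lemma pv_any_eq1 (t : List Char) (s : List Char) (ht : t ≠ [])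
    (hc : t.all (fun a => !(a == ',')) = true)
    (hsp : t.all (fun a => !(PySem.Chars.isspace a)) = true) :
    ((PySem.Chars.splitOn s [',']).map PySem.Chars.strip).any
        (fun p => PySem.Chars.isIn t (PySem.Chars.strip p))
      = PySem.Chars.isIn t s := by
  apply pv_bool_eq
  rw [List.any_eq_true]
  exact pv_trigger t s ht hc hsp

lemma pv_any_eq2 (t1 t2 : List Char) (s : List Char)
    (ht1 : t1 ≠ []) (hc1 : t1.all (fun a => !(a == ',')) = true)
    (hsp1 : t1.all (fun a => !(PySem.Chars.isspace a)) = true)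
    (ht2 : t2 ≠ []) (hc2 : t2.all (fun a => !(a == ',')) = true)
    (hsp2 : t2.all (fun a => !(PySem.Chars.isspace a)) = true) :
    ((PySem.Chars.splitOn s [',']).map PySem.Chars.strip).any
        (fun p => PySem.Chars.isIn t1 (PySem.Chars.strip p) || PySem.Chars.isIn t2 (PySem.Chars.strip p))
      = (PySem.Chars.isIn t1 s || PySem.Chars.isIn t2 s) := by
  apply pv_bool_eq
  have H1 := pv_trigger t1 s ht1 hc1 hsp1
  have H2 := pv_trigger t2 s ht2 hc2 hsp2
  simp only [List.any_eq_true, Bool.or_eq_true]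
  constructor
  · rintro ⟨p, hp, h | h⟩
    · exact Or.inl (H1.mp ⟨p, hp, h⟩)
    · exact Or.inr (H2.mp ⟨p, hp, h⟩)
  · rintro (h | h)
    · obtain ⟨p, hp, hc⟩ := H1.mpr h
      exact ⟨p, hp, Or.inl hc⟩
    · obtain ⟨p, hp, hc⟩ := H2.mpr h
      exact ⟨p, hp, Or.inr hc⟩

lemma pv_d0 : (PySem.Dict.ofList
    [("Hardcover", ""), ("Paperback", ""), ("Ebook", ""), ("Audiobook", ""), ("Movie", ""), ("Miniseries", "")]
      : PySem.Dict String String) = pvD false false false false false false := by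
  rfl

-- ===== VERDICT (by name: the statement is the Claim_ definition above) =====
set_option maxRecDepth 8192 in
theorem process_formats_spec : Claim_equal_process_formats := by
  intro s _
  unfold Spec_process_formats process_formats process_formats_alt
  by_cases h : s.toList = []
  · rw [h]
    decide
  · rw [if_neg h, pv_d0]
    simp only [pv_fold, Bool.false_or, List.map_cons, List.map_nil, List.any_cons, List.any_nil,
      Bool.or_false]
    rw [pv_any_eq1 "Hardcover".toList s.toList (by decide) (by decide) (by decide),
        pv_any_eq1 "Paperback".toList s.toList (by decide) (by decide) (by decide),
        pv_any_eq2 "Kindle".toList "eBook".toList s.toList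
          (by decide) (by decide) (by decide) (by decide) (by decide) (by decide),
        pv_any_eq2 "Audio".toList "Audiobook".toList s.toList
          (by decide) (by decide) (by decide) (by decide) (by decide) (by decide),
        pv_any_eq1 "Movie".toList s.toList (by decide) (by decide) (by decide),
        pv_any_eq2 "TV".toList "Miniseries".toList s.toList
          (by decide) (by decide) (by decide) (by decide) (by decide) (by decide)]
    simp [pvD, pvItems, pvMark]
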